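-- pv_equiv track=rewrite | github.com/js-rock/sassy-weather-ai | sanitizer.py | sanitize_text_input
-- ===== SOURCE A (Python) =====
-- def sanitize_text_input(text, max_length=100):
--     """Sanitize general text input"""
--     if not text or not isinstance(text, str):
--         return None
--
--     text = text.strip()
--
--     if len(text) > max_length:
--         return None
--
--     # Remove potentially dangerous characters
--     dangerous_chars = ['<', '>', '&', '"', "'", '`', ';', '|', '$', '(', ')']
--     for char in dangerous_chars:
--         text = text.replace(char, '')
--
--     return text
-- ===== SOURCE B (Python) =====
-- def sanitize_text_input(text, max_length=100):
--     """Sanitize general text input"""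
--     if not text or not isinstance(text, str):
--         return None
--
--     text = text.strip()
--
--     if len(text) > max_length:
--         return None
--
--     # Remove potentially dangerous characters in a single pass
--     dangerous = frozenset('<>&"\'`;|$()')
--     return ''.join(c for c in text if c not in dangerous)
-- ===== Notes on version B (the rewrite author's own statement) =====
-- stated objective: simpler
-- what changed: Replaces the eleven sequential str.replace passes over the text with one single filtering pass using a frozenset of the dangerous characters.
import Mathlib
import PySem

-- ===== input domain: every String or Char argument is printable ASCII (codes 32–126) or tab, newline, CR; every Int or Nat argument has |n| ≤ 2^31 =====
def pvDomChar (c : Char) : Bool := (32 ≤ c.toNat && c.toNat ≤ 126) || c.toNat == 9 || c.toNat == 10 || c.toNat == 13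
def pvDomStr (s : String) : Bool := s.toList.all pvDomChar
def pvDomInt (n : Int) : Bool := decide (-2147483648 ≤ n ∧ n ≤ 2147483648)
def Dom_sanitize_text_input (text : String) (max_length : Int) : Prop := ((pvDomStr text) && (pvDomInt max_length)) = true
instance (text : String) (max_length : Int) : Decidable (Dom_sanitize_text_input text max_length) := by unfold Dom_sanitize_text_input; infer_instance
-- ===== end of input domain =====

-- B replaces A's eleven sequential `.replace` passes with one single filtering pass
-- over the text using a set of the dangerous characters (objective: simpler).

-- ===== PORT A =====
def sanitize_text_input (text : String) (max_length : Int) : Option String :=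
  if text = "" then none
  else
    let t := PySem.Str.strip text
    if (PySem.Str.len t : Int) > max_length then none
    else
      let dangerous_chars : List String := ["<", ">", "&", "\"", "'", "`", ";", "|", "$", "(", ")"]
      some (dangerous_chars.foldl (fun s ch => PySem.Str.replace s ch "") t)

-- ===== PORT B =====
def sanitize_text_input_alt (text : String) (max_length : Int) : Option String :=
  if text = "" then none
  else
    let t := PySem.Str.strip text
    if (PySem.Str.len t : Int) > max_length then none
    else
      let dangerous : PySem.Set Char := PySem.Set.ofList ['<', '>', '&', '"', '\'', '`', ';', '|', '$', '(', ')']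
      some (String.ofList (t.toList.filter (fun c => !(PySem.Set.contains dangerous c))))

-- ===== PRECONDITION & SPEC =====
def Spec_sanitize_text_input (text : String) (max_length : Int) (out : Option String) : Prop := out = sanitize_text_input_alt text max_length
instance (text : String) (max_length : Int) (out : Option String) : Decidable (Spec_sanitize_text_input text max_length out) := by unfold Spec_sanitize_text_input; infer_instance

-- ===== CLAIM (what is proved, stated in full; the proofs are below) =====
def Claim_equal_sanitize_text_input : Prop := ∀ (text : String) (max_length : Int), Dom_sanitize_text_input text max_length → Spec_sanitize_text_input text max_length (sanitize_text_input text max_length)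

-- ===== LEMMAS AND PROOFS =====

-- replace.go with a single-character pattern and empty replacement is a filter
theorem replace_go_single (ch : Char) :
    ∀ (fuel : Nat) (l acc : List Char), l.length ≤ fuel →
      PySem.Chars.replace.go [ch] [] fuel l acc
        = acc.reverse ++ l.filter (fun c => !(c == ch)) := by
  intro fuel
  induction fuel with
  | zero =>
      intro l acc h
      have : l = [] := List.eq_nil_of_length_eq_zero (Nat.le_zero.mp h)
      subst this
      simp [PySem.Chars.replace.go]
  | succ n ih =>
      intro l acc h
      cases l with
      | nil => simp [PySem.Chars.replace.go]
      | cons c t =>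
          by_cases hc : c = ch
          · subst hc
            have hpre : List.isPrefixOf [c] (c :: t) = true := by
              simp [List.isPrefixOf]
            simp only [PySem.Chars.replace.go, hpre, if_pos, List.length_cons,
              List.length_nil, List.drop_succ_cons, List.drop_zero, List.reverse_nil,
              List.nil_append]
            rw [ih t acc (by simpa using h)]
            simp
          · have hpre : List.isPrefixOf [ch] (c :: t) = false := by
              simp [List.isPrefixOf]
              exact fun h' => hc h'.symm
            simp only [PySem.Chars.replace.go, hpre, Bool.false_eq_true, if_false]
            rw [ih t (c :: acc) (by simpa using h)]
            simp [hc]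

theorem replace_single (ch : Char) (l : List Char) :
    PySem.Chars.replace l [ch] [] = l.filter (fun c => !(c == ch)) := by
  have : ¬ (List.isEmpty [ch] = true) := by simp
  rw [PySem.Chars.replace]
  simp only [List.isEmpty]
  simpa using replace_go_single ch l.length l [] (le_refl _)

theorem replace_single_str (s : String) (ch : Char) :
    PySem.Str.replace s (String.ofList [ch]) ""
      = String.ofList (s.toList.filter (fun c => !(c == ch))) := by
  apply String.toList_injective
  rw [PySem.Str.toList_replace]
  simpa using replace_single ch s.toList

-- ===== VERDICT (by name: the statement is the Claim_ definition above) =====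
theorem sanitize_text_input_spec : Claim_equal_sanitize_text_input := by
  intro text max_length _
  simp only [Spec_sanitize_text_input, sanitize_text_input, sanitize_text_input_alt]
  split_ifs with h0 h1
  · rfl
  · rfl
  · refine congrArg some ?_
    have e : ∀ (s : String) (ch : Char),
        PySem.Str.replace s (String.ofList [ch]) ""
          = String.ofList (s.toList.filter (fun c => !(c == ch))) := replace_single_str
    rw [show ("<" : String) = String.ofList ['<'] from rfl,
        show (">" : String) = String.ofList ['>'] from rfl,
        show ("&" : String) = String.ofList ['&'] from rfl,
        show ("\"" : String) = String.ofList ['"'] from rfl,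
        show ("'" : String) = String.ofList ['\''] from rfl,
        show ("`" : String) = String.ofList ['`'] from rfl,
        show (";" : String) = String.ofList [';'] from rfl,
        show ("|" : String) = String.ofList ['|'] from rfl,
        show ("$" : String) = String.ofList ['$'] from rfl,
        show ("(" : String) = String.ofList ['('] from rfl,
        show (")" : String) = String.ofList [')'] from rfl]
    simp only [List.foldl_cons, List.foldl_nil]
    rw [e, e, e, e, e, e, e, e, e, e, e]
    simp only [String.toList_ofList, List.filter_filter]
    apply congrArg
    apply List.filter_congr
    intro c _
    have hb : ∀ d : Char, (c == d) = decide (c = d) := fun d => by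
      by_cases h : c = d <;> simp [h]
    rw [show (PySem.Set.ofList ['<', '>', '&', '"', '\'', '`', ';', '|', '$', '(', ')'] : PySem.Set Char)
          = ['<', '>', '&', '"', '\'', '`', ';', '|', '$', '(', ')'] from rfl]
    simp only [PySem.Set.contains, List.contains_eq_mem, List.mem_cons, List.not_mem_nil,
      or_false, hb]
    simp only [← decide_not, not_or, Bool.decide_and]
    ac_rfl
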